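-- pv_equiv track=rewrite | github.com/swemoney/adventofcode2020 | day/day16part2.py | match_fields_to_rules
-- ===== SOURCE A (Python) =====
-- def match_fields_to_rules(possible_rules):
--     rules_done = {}
--     num_matches = 1
--     while num_matches <= len(possible_rules):
--         for f in possible_rules:
--             if len(possible_rules[f]) == num_matches and f not in rules_done.values():
--                 for rule_name in possible_rules[f]:
--                     if rule_name not in rules_done:
--                         rules_done[rule_name] = f
--                 break
--         num_matches += 1
--     return rules_done
-- ===== SOURCE B (Python) =====
-- def match_fields_to_rules(possible_rules):
--     # Index: candidate-count -> first field with that count (one pass),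
--     # then one direct lookup per count instead of rescanning all fields.
--     first_by_len = {}
--     for f, candidates in possible_rules.items():
--         n = len(candidates)
--         if n not in first_by_len:
--             first_by_len[n] = f
--     rules_done = {}
--     for m in range(1, len(possible_rules) + 1):
--         if m in first_by_len:
--             f = first_by_len[m]
--             for rule_name in possible_rules[f]:
--                 if rule_name not in rules_done:
--                     rules_done[rule_name] = f
--     return rules_done
-- ===== Notes on version B (the rewrite author's own statement) =====
-- stated objective: faster
-- what changed: Instead of rescanning every field (with a values() scan per field) for each match-count, B builds a one-pass index from candidate-count to its first field and does one dict lookup per count; the dead 'f not in rules_done.values()' test disappears.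
import Mathlib
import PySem

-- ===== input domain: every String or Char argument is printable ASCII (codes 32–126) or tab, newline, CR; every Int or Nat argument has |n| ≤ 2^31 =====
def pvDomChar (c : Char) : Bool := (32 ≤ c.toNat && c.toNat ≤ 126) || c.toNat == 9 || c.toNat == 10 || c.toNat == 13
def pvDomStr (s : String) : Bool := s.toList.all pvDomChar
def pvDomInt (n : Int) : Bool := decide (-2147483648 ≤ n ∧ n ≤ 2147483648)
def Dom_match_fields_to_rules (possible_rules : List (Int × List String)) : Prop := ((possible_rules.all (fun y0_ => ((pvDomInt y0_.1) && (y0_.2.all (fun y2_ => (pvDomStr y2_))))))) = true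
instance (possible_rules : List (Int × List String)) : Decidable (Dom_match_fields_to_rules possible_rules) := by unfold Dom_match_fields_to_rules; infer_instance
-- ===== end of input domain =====

-- B replaces A's per-count rescan of all fields with a one-pass count->first-field index (faster, asymptotic).


-- ===== PORT A =====
-- possible_rules[f]: first-match lookup in the association list (the Python dict)
def pvLookup (pr : List (Int × List String)) (f : Int) : List String :=
  (PySem.Dict.mk pr).getD f []

-- the shared inner loop "for rule_name in possible_rules[f]: if rule_name not in rules_done: rules_done[rule_name] = f"
def pvAssign (pr : List (Int × List String)) (f : Int) (rd : PySem.Dict String Int) :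
    PySem.Dict String Int :=
  (pvLookup pr f).foldl (fun rd rn => if rd.contains rn then rd else rd.insert rn f) rd

-- "for f in possible_rules: if len(possible_rules[f]) == num_matches and f not in rules_done.values(): …; break"
def pvScanA (pr : List (Int × List String)) (m : Int) (rd : PySem.Dict String Int) :
    List (Int × List String) → PySem.Dict String Int
  | [] => rd
  | p :: rest =>
    if ((pvLookup pr p.1).length : Int) = m ∧ rd.values.contains p.1 = false then
      pvAssign pr p.1 rd
    else pvScanA pr m rd rest

def match_fields_to_rules (possible_rules : List (Int × List String)) : List (String × Int) :=
  ((PySem.List.pyRange 1 ((possible_rules.length : Int) + 1) 1).foldl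
      (fun rd m => pvScanA possible_rules m rd possible_rules)
      PySem.Dict.empty).items

-- ===== PORT B =====
-- one pass: candidate-count -> first field with that count
def pvFirstByLen (pr : List (Int × List String)) : PySem.Dict Int Int :=
  pr.foldl (fun d p =>
      if d.contains ((p.2.length : Int)) then d else d.insert ((p.2.length : Int)) p.1)
    PySem.Dict.empty

def match_fields_to_rules_alt (possible_rules : List (Int × List String)) : List (String × Int) :=
  let fbl := pvFirstByLen possible_rules
  ((PySem.List.pyRange 1 ((possible_rules.length : Int) + 1) 1).foldl
      (fun rd m =>
        match fbl.get? m with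
        | some f => pvAssign possible_rules f rd
        | none => rd)
      PySem.Dict.empty).items

-- ===== PRECONDITION & SPEC =====
-- Pre_ excludes association lists with duplicate field keys: a Python dict argument cannot
-- carry duplicate keys, so such lists do not correspond to any input A actually receives.
def Pre_match_fields_to_rules (possible_rules : List (Int × List String)) : Prop :=
  (possible_rules.map Prod.fst).Nodup
instance (possible_rules : List (Int × List String)) : Decidable (Pre_match_fields_to_rules possible_rules) := by
  unfold Pre_match_fields_to_rules; infer_instance

def pvWitness_match_fields_to_rules : (List (Int × List String)) :=
  [(0, ["row", "seat"]), (1, ["seat"]), (2, ["row", "seat", "class"])]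

def Spec_match_fields_to_rules (possible_rules : List (Int × List String)) (out : List (String × Int)) : Prop := out = match_fields_to_rules_alt possible_rules
instance (possible_rules : List (Int × List String)) (out : List (String × Int)) : Decidable (Spec_match_fields_to_rules possible_rules out) := by unfold Spec_match_fields_to_rules; infer_instance

-- ===== CLAIM (what is proved, stated in full; the proofs are below) =====
def Claim_equal_match_fields_to_rules : Prop := ∀ (possible_rules : List (Int × List String)), Dom_match_fields_to_rules possible_rules → Pre_match_fields_to_rules possible_rules → Spec_match_fields_to_rules possible_rules (match_fields_to_rules possible_rules)

-- ===== LEMMAS AND PROOFS =====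

-- under unique keys, the dict lookup of a listed pair returns that pair's value
lemma pvLookup_mem {pr : List (Int × List String)} {p : Int × List String}
    (hnd : (pr.map Prod.fst).Nodup) (hp : p ∈ pr) : pvLookup pr p.1 = p.2 := by
  have hmem : (p.1, p.2) ∈ (PySem.Dict.mk pr).items := by simpa using hp
  have hk : (PySem.Dict.mk pr).keys.Nodup := by simpa [PySem.Dict.keys_mk] using hnd
  simpa [pvLookup] using PySem.Dict.getD_of_mem_items _ hmem hk []

-- unique keys make the key map injective on members
lemma pvKey_inj {pr : List (Int × List String)} {p q : Int × List String}
    (hnd : (pr.map Prod.fst).Nodup) (hp : p ∈ pr) (hq : q ∈ pr) (h : p.1 = q.1) : p = q :=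
  List.inj_on_of_nodup_map hnd hp hq h

-- accumulator form of B's index construction
lemma pvFBL_aux (m : Int) : ∀ (l : List (Int × List String)) (d : PySem.Dict Int Int),
    (l.foldl (fun d p =>
        if d.contains ((p.2.length : Int)) then d else d.insert ((p.2.length : Int)) p.1) d).get? m
      = (d.get? m).or ((l.find? (fun p => ((p.2.length : Int)) == m)).map Prod.fst)
  | [], d => by simp
  | p :: l, d => by
    rw [List.foldl_cons]
    by_cases hm : ((p.2.length : Int)) = m
    · rw [List.find?_cons_of_pos (by simpa using hm)]
      by_cases hc : d.contains ((p.2.length : Int)) = true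
      · rw [if_pos hc, pvFBL_aux m l d]
        obtain ⟨v, hv⟩ : ∃ v, d.get? m = some v := by
          have h1 := PySem.Dict.contains_eq_isSome_get? d ((p.2.length : Int))
          rw [hc, hm] at h1
          exact Option.isSome_iff_exists.mp h1.symm
        simp [hv]
      · rw [if_neg hc, pvFBL_aux m l _, PySem.Dict.get?_insert, if_pos hm.symm]
        have hnone : d.get? m = none := by
          rw [PySem.Dict.get?_eq_none_iff_contains d m, ← hm]
          simpa using hc
        simp [hnone]
    · rw [List.find?_cons_of_neg (by simpa using hm)]
      by_cases hc : d.contains ((p.2.length : Int)) = true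
      · rw [if_pos hc, pvFBL_aux m l d]
      · rw [if_neg hc, pvFBL_aux m l _, PySem.Dict.get?_insert,
          if_neg (fun h => hm h.symm)]

-- B's index: lookup in first_by_len is the first field whose candidate count matches
lemma pvFirstByLen_get? (pr : List (Int × List String)) (m : Int) :
    (pvFirstByLen pr).get? m = (pr.find? (fun p => ((p.2.length : Int)) == m)).map Prod.fst := by
  have := pvFBL_aux m pr PySem.Dict.empty
  simpa [pvFirstByLen, PySem.Dict.get?_empty] using this

-- values of the assignment loop: only f is added
lemma pvAssign_values_aux (f : Int) : ∀ (cs : List String) (rd : PySem.Dict String Int) (w : Int),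
    w ∈ (cs.foldl (fun rd rn => if rd.contains rn then rd else rd.insert rn f) rd).values →
      w = f ∨ w ∈ rd.values
  | [], _, _, h => Or.inr (by simpa using h)
  | c :: cs, rd, w, h => by
    rw [List.foldl_cons] at h
    by_cases hc : rd.contains c = true
    · rw [if_pos hc] at h
      exact pvAssign_values_aux f cs rd w h
    · rw [if_neg hc] at h
      rcases pvAssign_values_aux f cs _ w h with h1 | h2
      · exact Or.inl h1
      · rcases PySem.Dict.mem_values_insert rd c f w h2 with h3 | h4
        · exact Or.inl h3
        · exact Or.inr h4

lemma pvAssign_values {pr : List (Int × List String)} {f : Int} {rd : PySem.Dict String Int}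
    {w : Int} (hw : w ∈ (pvAssign pr f rd).values) : w = f ∨ w ∈ rd.values :=
  pvAssign_values_aux f (pvLookup pr f) rd w hw

-- A's scan, under the invariant that no listed field with count m is already a value,
-- finds exactly the first field whose candidate count is m
lemma pvScanA_eq_find {pr : List (Int × List String)} (m : Int) (rd : PySem.Dict String Int)
    (hnd : (pr.map Prod.fst).Nodup) :
    ∀ (l : List (Int × List String)), (∀ p ∈ l, p ∈ pr) →
    (∀ p ∈ l, p.1 ∈ rd.values → ((p.2.length : Int)) ≠ m) →
    pvScanA pr m rd l =
      match l.find? (fun p => ((p.2.length : Int)) == m) with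
      | some p => pvAssign pr p.1 rd
      | none => rd
  | [], _, _ => by simp [pvScanA]
  | p :: l, hl, hinv => by
    have hpp : p ∈ pr := hl p List.mem_cons_self
    simp only [pvScanA]
    by_cases hm : ((p.2.length : Int)) = m
    · have hnv : p.1 ∉ rd.values := fun hv => hinv p List.mem_cons_self hv hm
      have hcond : ((pvLookup pr p.1).length : Int) = m ∧ rd.values.contains p.1 = false :=
        ⟨by rw [pvLookup_mem hnd hpp]; exact hm, by simpa using hnv⟩
      rw [if_pos hcond, List.find?_cons_of_pos (by simpa using hm)]
    · have hcond : ¬ (((pvLookup pr p.1).length : Int) = m ∧ rd.values.contains p.1 = false) := by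
        rw [pvLookup_mem hnd hpp]; exact fun h => hm h.1
      rw [if_neg hcond, List.find?_cons_of_neg (by simpa using hm)]
      exact pvScanA_eq_find m rd hnd l (fun q hq => hl q (List.mem_cons_of_mem p hq))
        (fun q hq => hinv q (List.mem_cons_of_mem p hq))

-- the two per-count folds agree as long as assigned fields never recur as candidates
lemma pvFold_eq (pr : List (Int × List String)) (hnd : (pr.map Prod.fst).Nodup) :
    ∀ (ms : List Int) (rd : PySem.Dict String Int), ms.Nodup →
      (∀ p ∈ pr, p.1 ∈ rd.values → ((p.2.length : Int)) ∉ ms) →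
      ms.foldl (fun rd m => pvScanA pr m rd pr) rd =
      ms.foldl (fun rd m =>
        match (pvFirstByLen pr).get? m with
        | some f => pvAssign pr f rd
        | none => rd) rd
  | [], _, _, _ => rfl
  | m :: ms, rd, hnodup, hinv => by
    rw [List.foldl_cons, List.foldl_cons, pvFirstByLen_get?,
      pvScanA_eq_find m rd hnd pr (fun p hp => hp)
        (fun p hp hv he => hinv p hp hv (he ▸ List.mem_cons_self))]
    cases hfind : pr.find? (fun p => ((p.2.length : Int)) == m) with
    | none =>
      simp only [Option.map_none]
      exact pvFold_eq pr hnd ms rd hnodup.of_cons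
        (fun p hp hv => fun hmem => hinv p hp hv (List.mem_cons_of_mem m hmem))
    | some p0 =>
      simp only [Option.map_some]
      refine pvFold_eq pr hnd ms (pvAssign pr p0.1 rd) hnodup.of_cons ?_
      intro q hq hv hmem
      have hp0 : p0 ∈ pr := List.mem_of_find?_eq_some hfind
      have hlen : ((p0.2.length : Int)) = m := by
        have := List.find?_some hfind; simpa using this
      rcases pvAssign_values hv with h1 | h2
      · have : q = p0 := pvKey_inj hnd hq hp0 h1
        subst this
        rw [hlen] at hmem
        exact (List.nodup_cons.mp hnodup).1 hmem
      · exact hinv q hq h2 (List.mem_cons_of_mem m hmem)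

-- ===== VERDICT (by name: the statement is the Claim_ definition above) =====
theorem match_fields_to_rules_spec : Claim_equal_match_fields_to_rules := by
  intro pr _ hnd
  unfold Spec_match_fields_to_rules match_fields_to_rules match_fields_to_rules_alt
  have hms : (PySem.List.pyRange 1 ((pr.length : Int) + 1) 1).Nodup := by
    rw [PySem.List.pyRange_of_pos _ _ (by norm_num : (0:Int) < 1)]
    refine List.Nodup.map ?_ List.nodup_range
    intro a b h; simpa using h
  rw [pvFold_eq pr hnd _ PySem.Dict.empty hms
    (fun p hp hv => absurd hv List.not_mem_nil)]
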